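-- pv_equiv track=rewrite | github.com/RMWinslow/posts | language/wordshapes/gen_degree_sequences.py | calc_degree_sequence
-- ===== SOURCE A (Python) =====
-- from collections import defaultdict, Counter
--
-- def calc_degree_sequence(word):
--     # https://mathworld.wolfram.com/DegreeSequence.html
--     connections = defaultdict(set)
--     for a,b in zip(word,word[1:]):
--         if a!=b: #(exclude loops)
--             connections[a].add(b)
--             connections[b].add(a)
--     degrees_list = [len(s) for s in connections.values()]
--     return tuple(sorted(degrees_list, reverse=True)) #(tuple for hashability)
-- ===== SOURCE B (Python) =====
-- def calc_degree_sequence(word):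
--     # Sort-then-scan: list every directed arc (both directions) of each unequal
--     # adjacent pair, sort the arcs, drop adjacent duplicates, then emit one
--     # degree per run of equal first components (= that vertex's arc count).
--     arcs = []
--     for a, b in zip(word, word[1:]):
--         if a != b:
--             arcs.append((a, b))
--             arcs.append((b, a))
--     arcs.sort()
--     uniq = []
--     prev = None
--     for arc in arcs:
--         if arc != prev:
--             uniq.append(arc)
--             prev = arc
--     firsts = [v for v, _ in uniq]
--     degrees = []
--     prev = None
--     for v in firsts:
--         if v != prev:
--             degrees.append(firsts.count(v))
--             prev = v
--     degrees.sort(reverse=True)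
--     return tuple(degrees)
-- ===== Notes on version B (the rewrite author's own statement) =====
-- stated objective: alternative
-- what changed: A incrementally maintains a vertex-to-neighbor-set dictionary while scanning the word; B instead materialises every directed arc of the unequal adjacent pairs, sorts the arc list, removes adjacent duplicates, and reads each vertex's degree off as the length of its run of equal first components.
import Mathlib
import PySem

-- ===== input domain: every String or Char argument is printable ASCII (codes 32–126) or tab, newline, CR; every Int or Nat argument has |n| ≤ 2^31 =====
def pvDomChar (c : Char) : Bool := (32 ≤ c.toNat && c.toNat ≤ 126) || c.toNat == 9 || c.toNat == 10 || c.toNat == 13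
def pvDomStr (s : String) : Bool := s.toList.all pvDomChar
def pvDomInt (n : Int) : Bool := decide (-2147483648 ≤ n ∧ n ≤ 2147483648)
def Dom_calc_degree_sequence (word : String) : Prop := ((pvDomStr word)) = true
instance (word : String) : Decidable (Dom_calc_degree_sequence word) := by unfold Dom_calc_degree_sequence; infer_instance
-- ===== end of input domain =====

-- B replaces A's incrementally built vertex→neighbor-set dictionary by a sort-then-scan pass:
-- it lists every directed arc of the unequal adjacent pairs, sorts the arcs, drops adjacent
-- duplicates and reads one degree per run of equal first components (objective: alternative).

-- ===== PORT A =====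
def calc_degree_sequence (word : String) : List Int :=
  let cs := word.toList
  let connections : PySem.Dict Char (PySem.Set Char) :=
    (cs.zip cs.tail).foldl
      (fun d p =>
        if p.1 ≠ p.2 then
          let d1 := d.insert p.1 (PySem.Set.add (d.getD p.1 PySem.Set.empty) p.2)
          d1.insert p.2 (PySem.Set.add (d1.getD p.2 PySem.Set.empty) p.1)
        else d)
      PySem.Dict.empty
  let degrees_list := connections.values.map (fun s => PySem.Set.len s)
  PySem.List.sorted degrees_list (fun x => x) true

-- ===== PORT B =====
-- Python's `arcs.sort()` orders Char pairs lexicographically; pvArcKey is a strictly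
-- monotone integer encoding of that order (char codes are < 1114112), and all ties under
-- it are identical pairs, so sorting by pvArcKey is exact.
def pvArcKey (p : Char × Char) : Nat := p.1.toNat * 1114112 + p.2.toNat

def calc_degree_sequence_alt (word : String) : List Int :=
  let cs := word.toList
  let arcs := (cs.zip cs.tail).foldl
      (fun l p => if p.1 ≠ p.2 then l ++ [(p.1, p.2), (p.2, p.1)] else l) []
  let arcs2 := PySem.List.sorted arcs pvArcKey false
  let uniq := (arcs2.foldl
      (fun st arc => if st.2 ≠ some arc then (st.1 ++ [arc], some arc) else st)
      (([] : List (Char × Char)), (none : Option (Char × Char)))).1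
  let firsts := uniq.map (fun v => v.1)
  let degrees := (firsts.foldl
      (fun st v => if st.2 ≠ some v then (st.1 ++ [(PySem.List.count firsts v : Int)], some v) else st)
      (([] : List Int), (none : Option Char))).1
  PySem.List.sorted degrees (fun x => x) true

-- ===== PRECONDITION & SPEC =====
def Spec_calc_degree_sequence (word : String) (out : List Int) : Prop := out = calc_degree_sequence_alt word
instance (word : String) (out : List Int) : Decidable (Spec_calc_degree_sequence word out) := by unfold Spec_calc_degree_sequence; infer_instance

-- ===== CLAIM (what is proved, stated in full; the proofs are below) =====
def Claim_equal_calc_degree_sequence : Prop := ∀ (word : String), Dom_calc_degree_sequence word → Spec_calc_degree_sequence word (calc_degree_sequence word)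

-- ===== LEMMAS AND PROOFS =====

-- named loop bodies (definitionally equal to the lambdas in the ports)
def pvStepA (d : PySem.Dict Char (PySem.Set Char)) (p : Char × Char) : PySem.Dict Char (PySem.Set Char) :=
  if p.1 ≠ p.2 then
    let d1 := d.insert p.1 (PySem.Set.add (d.getD p.1 PySem.Set.empty) p.2)
    d1.insert p.2 (PySem.Set.add (d1.getD p.2 PySem.Set.empty) p.1)
  else d

def pvStepL (l : List (Char × Char)) (p : Char × Char) : List (Char × Char) :=
  if p.1 ≠ p.2 then l ++ [(p.1, p.2), (p.2, p.1)] else l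

-- ghost edge set (proof-only): the distinct normalized edges seen so far
def pvNormEdge (a b : Char) : Char × Char := if a < b then (a, b) else (b, a)

def pvStepE (E : PySem.Set (Char × Char)) (p : Char × Char) : PySem.Set (Char × Char) :=
  if p.1 ≠ p.2 then PySem.Set.add E (pvNormEdge p.1 p.2) else E

-- invariant tying A's dictionary to the ghost edge set
def pvInv (E : List (Char × Char)) (D : PySem.Dict Char (PySem.Set Char)) : Prop :=
  (∀ e ∈ E, e.1 < e.2) ∧ E.Nodup ∧ D.keys.Nodup ∧
  (∀ c, c ∈ D.keys ↔ ∃ e ∈ E, c = e.1 ∨ c = e.2) ∧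
  (∀ c, (D.getD c PySem.Set.empty).Nodup) ∧
  (∀ c d, d ∈ D.getD c PySem.Set.empty ↔ c ≠ d ∧ pvNormEdge c d ∈ E)

theorem pvNormEdge_fst_lt_snd {a b : Char} (h : a ≠ b) :
    (pvNormEdge a b).1 < (pvNormEdge a b).2 := by
  unfold pvNormEdge; split_ifs with h1
  · exact h1
  · exact lt_of_le_of_ne (not_lt.mp h1) (Ne.symm h)

theorem pvNormEdge_comm (a b : Char) : pvNormEdge a b = pvNormEdge b a := by
  unfold pvNormEdge
  rcases lt_trichotomy a b with h | h | h
  · simp [h, not_lt.mpr h.le]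
  · simp [h]
  · simp [h, not_lt.mpr h.le]

theorem pvNormEdge_right_inj {a d b : Char} (hb : a ≠ b) :
    pvNormEdge a d = pvNormEdge a b ↔ d = b := by
  constructor
  · intro h
    unfold pvNormEdge at h
    split_ifs at h with h1 h2 h2 <;> rw [Prod.ext_iff] at h
    · exact h.2
    · exact absurd h.1 hb
    · exact absurd h.2 hb
    · exact h.1
  · rintro rfl; rfl

theorem pvNormEdge_ends (a b : Char) :
    ((pvNormEdge a b).1 = a ∧ (pvNormEdge a b).2 = b) ∨
    ((pvNormEdge a b).1 = b ∧ (pvNormEdge a b).2 = a) := by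
  unfold pvNormEdge; split_ifs <;> simp

theorem pvNormEdge_eq_iff {x y a b : Char} (hxy : x ≠ y) (hab : a ≠ b) :
    pvNormEdge x y = pvNormEdge a b ↔ (x = a ∧ y = b) ∨ (x = b ∧ y = a) := by
  constructor
  · intro h
    rcases pvNormEdge_ends x y with ⟨h1, h2⟩ | ⟨h1, h2⟩ <;>
      rcases pvNormEdge_ends a b with ⟨g1, g2⟩ | ⟨g1, g2⟩ <;>
        rw [h] at h1 h2 <;> rw [g1] at h1 <;> rw [g2] at h2
    · exact Or.inl ⟨h1.symm, h2.symm⟩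
    · exact Or.inr ⟨h1.symm, h2.symm⟩
    · exact Or.inr ⟨h2.symm, h1.symm⟩
    · exact Or.inl ⟨h2.symm, h1.symm⟩
  · rintro (⟨rfl, rfl⟩ | ⟨rfl, rfl⟩)
    · rfl
    · exact pvNormEdge_comm x y

-- one step preserves the invariant
theorem pvInv_step {E : List (Char × Char)} {D : PySem.Dict Char (PySem.Set Char)}
    (h : pvInv E D) (p : Char × Char) : pvInv (pvStepE E p) (pvStepA D p) := by
  obtain ⟨hW, hN, hKN, hK, hS, hM⟩ := h
  by_cases hab : p.1 = p.2
  · simpa [pvStepE, pvStepA, hab] using ⟨hW, hN, hKN, hK, hS, hM⟩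
  · have hba : p.2 ≠ p.1 := fun he => hab he.symm
    set en := pvNormEdge p.1 p.2 with hen
    set Sa := PySem.Set.add (D.getD p.1 PySem.Set.empty) p.2 with hSa
    set Sb := PySem.Set.add (D.getD p.2 PySem.Set.empty) p.1 with hSb
    have hstepE : pvStepE E p = PySem.Set.add E en := by
      simp only [pvStepE, if_pos hab]; rfl
    have hstepA : pvStepA D p = (D.insert p.1 Sa).insert p.2 Sb := by
      simp only [pvStepA, if_pos hab]
      rw [PySem.Dict.getD_insert]
      simp only [hba, if_false]
      rfl
    have hends : ∀ c, (c = en.1 ∨ c = en.2) ↔ (c = p.1 ∨ c = p.2) := by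
      intro c
      rcases pvNormEdge_ends p.1 p.2 with ⟨h1, h2⟩ | ⟨h1, h2⟩
      · rw [← hen] at h1 h2; rw [h1, h2]
      · rw [← hen] at h1 h2; rw [h1, h2]; tauto
    have hgetD : ∀ c, ((D.insert p.1 Sa).insert p.2 Sb).getD c PySem.Set.empty =
        if c = p.2 then Sb else if c = p.1 then Sa else D.getD c PySem.Set.empty := by
      intro c; rw [PySem.Dict.getD_insert, PySem.Dict.getD_insert]
    rw [hstepE, hstepA]
    refine ⟨?_, PySem.Set.nodup_add E en hN, ?_, ?_, ?_, ?_⟩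
    · intro e' he'
      rw [PySem.Set.mem_add] at he'
      rcases he' with he' | rfl
      · exact hW e' he'
      · exact pvNormEdge_fst_lt_snd hab
    · exact PySem.Dict.nodup_keys_insert _ _ _ (PySem.Dict.nodup_keys_insert _ _ _ hKN)
    · intro c
      rw [PySem.Dict.mem_keys_insert, PySem.Dict.mem_keys_insert, hK c]
      constructor
      · rintro (rfl | rfl | ⟨e', he', hc⟩)
        · exact ⟨en, by rw [PySem.Set.mem_add]; right; rfl, (hends _).mpr (Or.inr rfl)⟩
        · exact ⟨en, by rw [PySem.Set.mem_add]; right; rfl, (hends _).mpr (Or.inl rfl)⟩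
        · exact ⟨e', by rw [PySem.Set.mem_add]; exact Or.inl he', hc⟩
      · rintro ⟨e', he', hc⟩
        rw [PySem.Set.mem_add] at he'
        rcases he' with he' | rfl
        · exact Or.inr (Or.inr ⟨e', he', hc⟩)
        · rcases (hends c).mp hc with rfl | rfl
          · exact Or.inr (Or.inl rfl)
          · exact Or.inl rfl
    · intro c
      rw [hgetD c]
      split_ifs with h1 h2
      · exact PySem.Set.nodup_add _ _ (hS p.2)
      · exact PySem.Set.nodup_add _ _ (hS p.1)
      · exact hS c
    · intro c d
      rw [hgetD c]
      split_ifs with h1 h2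
      · subst h1
        rw [hSb, PySem.Set.mem_add, hM p.2 d, PySem.Set.mem_add]
        constructor
        · rintro (⟨hne, hE'⟩ | rfl)
          · exact ⟨hne, Or.inl hE'⟩
          · exact ⟨hba, Or.inr (by rw [hen, pvNormEdge_comm])⟩
        · rintro ⟨hne, hE' | heq⟩
          · exact Or.inl ⟨hne, hE'⟩
          · right
            rw [hen, pvNormEdge_comm p.1 p.2] at heq
            exact (pvNormEdge_right_inj hba).mp heq
      · subst h2
        rw [hSa, PySem.Set.mem_add, hM p.1 d, PySem.Set.mem_add]
        constructor
        · rintro (⟨hne, hE'⟩ | rfl)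
          · exact ⟨hne, Or.inl hE'⟩
          · exact ⟨hab, Or.inr (by rw [hen])⟩
        · rintro ⟨hne, hE' | heq⟩
          · exact Or.inl ⟨hne, hE'⟩
          · right
            rw [hen] at heq
            exact (pvNormEdge_right_inj hab).mp heq
      · have hnotc : pvNormEdge c d ≠ en := by
          intro heq
          have h' := (hends c).mp ?_
          · tauto
          · rcases pvNormEdge_ends c d with ⟨hx, _⟩ | ⟨_, hx⟩
            · left; rw [← heq, hx]
            · right; rw [← heq, hx]
        rw [hM c d, PySem.Set.mem_add]
        constructor
        · rintro ⟨hne, hE'⟩; exact ⟨hne, Or.inl hE'⟩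
        · rintro ⟨hne, hE' | heq⟩
          · exact ⟨hne, hE'⟩
          · exact absurd heq hnotc

theorem pvInv_fold {ps : List (Char × Char)} :
    ∀ {E : List (Char × Char)} {D : PySem.Dict Char (PySem.Set Char)},
      pvInv E D → pvInv (ps.foldl pvStepE E) (ps.foldl pvStepA D) := by
  induction ps with
  | nil => intro E D h; exact h
  | cons p ps ih => intro E D h; exact ih (pvInv_step h p)

theorem pvInv_init : pvInv ([] : List (Char × Char)) PySem.Dict.empty := by
  refine ⟨by simp, by simp, PySem.Dict.nodup_keys_empty, ?_, ?_, ?_⟩ <;>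
    simp [PySem.Dict.keys_empty, PySem.Dict.getD_empty, PySem.Set.empty]

-- B's arc list has exactly the arcs of the ghost edge set, in both directions
theorem pvL_mem (ps : List (Char × Char)) :
    ∀ (L : List (Char × Char)) (E : PySem.Set (Char × Char)),
      (∀ x y : Char, (x, y) ∈ L ↔ x ≠ y ∧ pvNormEdge x y ∈ E) →
      ∀ x y : Char, (x, y) ∈ ps.foldl pvStepL L ↔ x ≠ y ∧ pvNormEdge x y ∈ ps.foldl pvStepE E := by
  induction ps with
  | nil => intro L E h x y; exact h x y
  | cons p ps ih =>
    intro L E h x y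
    rw [List.foldl_cons, List.foldl_cons]
    refine ih _ _ ?_ x y
    intro x y
    by_cases hp : p.1 = p.2
    · simpa [pvStepL, pvStepE, hp] using h x y
    · have hL : pvStepL L p = L ++ [(p.1, p.2), (p.2, p.1)] := by simp [pvStepL, hp]
      have hE : pvStepE E p = PySem.Set.add E (pvNormEdge p.1 p.2) := by simp [pvStepE, hp]
      rw [hL, hE, List.mem_append, PySem.Set.mem_add]
      constructor
      · rintro (hmem | hmem)
        · obtain ⟨hxy, hE'⟩ := (h x y).mp hmem
          exact ⟨hxy, Or.inl hE'⟩
        · simp only [List.mem_cons, List.not_mem_nil, or_false] at hmem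
          rcases hmem with h1 | h1
          · obtain ⟨hx, hy⟩ := Prod.ext_iff.mp h1
            subst hx; subst hy
            exact ⟨hp, Or.inr rfl⟩
          · obtain ⟨hx, hy⟩ := Prod.ext_iff.mp h1
            subst hx; subst hy
            exact ⟨fun he => hp he.symm, Or.inr (pvNormEdge_comm p.2 p.1)⟩
      · rintro ⟨hxy, hE' | heq⟩
        · exact Or.inl ((h x y).mpr ⟨hxy, hE'⟩)
        · rcases (pvNormEdge_eq_iff hxy hp).mp heq with ⟨rfl, rfl⟩ | ⟨rfl, rfl⟩
          · exact Or.inr (by simp)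
          · exact Or.inr (by simp)

-- adjacent-duplicate removal (the uniq/degrees loops of B)
def pvDedup {α : Type} [DecidableEq α] : Option α → List α → List α
  | _, [] => []
  | prev, a :: l => if prev ≠ some a then a :: pvDedup (some a) l else pvDedup prev l

theorem pvDedup_foldl {α β : Type} [DecidableEq α] (f : α → β) (l : List α) :
    ∀ (acc : List β) (prev : Option α),
      (l.foldl (fun st a => if st.2 ≠ some a then (st.1 ++ [f a], some a) else st) (acc, prev)).1
        = acc ++ (pvDedup prev l).map f := by
  induction l with
  | nil => intro acc prev; simp [pvDedup]
  | cons a l ih =>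
    intro acc prev
    rw [List.foldl_cons]
    by_cases h : prev = some a
    · simp only [h, ne_eq, not_true_eq_false, if_false]
      rw [ih, pvDedup]
      simp [h]
    · simp only [ne_eq, h, not_false_eq_true, if_true]
      rw [ih, pvDedup]
      simp [h]

theorem pvDedup_subset {α : Type} [DecidableEq α] (l : List α) :
    ∀ (prev : Option α) (x : α), x ∈ pvDedup prev l → x ∈ l := by
  induction l with
  | nil => intro prev x h; simpa [pvDedup] using h
  | cons a l ih =>
    intro prev x h
    rw [pvDedup] at h
    split_ifs at h with h1
    · rcases List.mem_cons.mp h with rfl | h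
      · exact List.mem_cons_self ..
      · exact List.mem_cons_of_mem _ (ih _ _ h)
    · exact List.mem_cons_of_mem _ (ih _ _ h)

theorem pvDedup_mem {α : Type} [DecidableEq α] (l : List α) :
    ∀ (prev : Option α) (x : α), x ∈ l → x ∈ pvDedup prev l ∨ prev = some x := by
  induction l with
  | nil => intro prev x h; exact absurd h (List.not_mem_nil)
  | cons a l ih =>
    intro prev x h
    rw [pvDedup]
    split_ifs with h1
    · rcases List.mem_cons.mp h with rfl | h
      · exact Or.inl (List.mem_cons_self ..)
      · rcases ih (some a) x h with h2 | h2
        · exact Or.inl (List.mem_cons_of_mem _ h2)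
        · injection h2 with h2
          exact Or.inl (h2 ▸ List.mem_cons_self ..)
    · push_neg at h1
      rcases List.mem_cons.mp h with rfl | h
      · exact Or.inr h1
      · rcases ih prev x h with h2 | h2
        · rw [h1] at h2 ⊢
          exact Or.inl h2
        · exact Or.inr h2

theorem pvDedup_mem_none {α : Type} [DecidableEq α] (l : List α) (x : α) :
    x ∈ pvDedup none l ↔ x ∈ l := by
  constructor
  · exact pvDedup_subset l none x
  · intro h
    rcases pvDedup_mem l none x h with h2 | h2
    · exact h2
    · exact absurd h2 (by simp)

theorem pvDedup_pairwise {α : Type} [DecidableEq α] (key : α → Nat)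
    (hinj : ∀ a b : α, key a = key b → a = b) :
    ∀ (l : List α), l.Pairwise (fun a b => key a ≤ key b) →
    ∀ (prev : Option α), (∀ p, prev = some p → ∀ x ∈ l, key p ≤ key x) →
      (pvDedup prev l).Pairwise (fun a b => key a < key b) ∧
      (∀ p, prev = some p → ∀ x ∈ pvDedup prev l, key p < key x) := by
  intro l
  induction l with
  | nil =>
    intro _ prev _
    exact ⟨by simp [pvDedup], by simp [pvDedup]⟩
  | cons a l ih =>
    intro hpair prev hprev
    obtain ⟨ha, hl⟩ := List.pairwise_cons.mp hpair
    have IH := ih hl (some a) (by rintro p hp; injection hp with hp; subst hp; exact ha)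
    by_cases h : prev = some a
    · rw [show pvDedup prev (a :: l) = pvDedup (some a) l by rw [pvDedup]; simp [h]]
      refine ⟨IH.1, ?_⟩
      intro p hp x hx
      rw [h] at hp; injection hp with hp; subst hp
      exact IH.2 a rfl x hx
    · rw [show pvDedup prev (a :: l) = a :: pvDedup (some a) l by rw [pvDedup]; simp [h]]
      constructor
      · exact List.pairwise_cons.mpr ⟨IH.2 a rfl, IH.1⟩
      · intro p hp x hx
        have hpa : key p ≤ key a := hprev p hp a (List.mem_cons_self ..)
        have hne : p ≠ a := by
          intro e; exact h (by rw [hp, e])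
        have hlt : key p < key a := lt_of_le_of_ne hpa (fun e => hne (hinj _ _ e))
        rcases List.mem_cons.mp hx with rfl | hx'
        · exact hlt
        · exact lt_trans hlt (IH.2 a rfl x hx')

theorem pvPairwiseLtNodup {α : Type} (key : α → Nat) (l : List α)
    (h : l.Pairwise (fun a b => key a < key b)) : l.Nodup :=
  h.imp (fun hlt => fun e => absurd (e ▸ hlt) (lt_irrefl _))

theorem pvCharLt (c : Char) : c.toNat < 1114112 := by
  have h := c.valid
  have e : c.toNat = c.val.toNat := rfl
  rcases h with h | ⟨_, h⟩ <;> omega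

theorem pvCharToNatInj : ∀ a b : Char, a.toNat = b.toNat → a = b := fun a b h =>
  Char.ext (UInt32.toNat_inj.mp h)

theorem pvArcKeyInj : ∀ a b : Char × Char, pvArcKey a = pvArcKey b → a = b := by
  intro a b h
  unfold pvArcKey at h
  have h1 := pvCharLt a.2
  have h2 := pvCharLt b.2
  have e1 : a.1.toNat = b.1.toNat := by omega
  have e2 : a.2.toNat = b.2.toNat := by omega
  exact Prod.ext (pvCharToNatInj _ _ e1) (pvCharToNatInj _ _ e2)

-- values as a map over keys (for a dict with distinct keys)
theorem pvValues_map {κ ν μ : Type} [BEq κ] [LawfulBEq κ] (d : PySem.Dict κ ν)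
    (h : d.keys.Nodup) (f : ν → μ) (d0 : ν) :
    d.values.map f = d.keys.map (fun k => f (d.getD k d0)) := by
  show (d.items.map (fun x => x.2)).map f = (d.items.map (fun x => x.1)).map _
  rw [List.map_map, List.map_map]
  refine List.map_congr_left ?_
  intro p hp
  have := PySem.Dict.getD_of_mem_items d (k := p.1) (v := p.2) (by simpa using hp) h d0
  simp [this]

-- ===== VERDICT (by name: the statement is the Claim_ definition above) =====
theorem calc_degree_sequence_spec : Claim_equal_calc_degree_sequence := by
  unfold Claim_equal_calc_degree_sequence
  intro word _
  unfold Spec_calc_degree_sequence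
  -- names for the ports' intermediate values
  have hA : calc_degree_sequence word =
      PySem.List.sorted (((word.toList.zip word.toList.tail).foldl pvStepA PySem.Dict.empty).values.map
        (fun s => PySem.Set.len s)) (fun x => x) true := rfl
  have hB : calc_degree_sequence_alt word =
      PySem.List.sorted
        (((((PySem.List.sorted ((word.toList.zip word.toList.tail).foldl pvStepL []) pvArcKey false).foldl
            (fun st arc => if st.2 ≠ some arc then (st.1 ++ [arc], some arc) else st)
            (([] : List (Char × Char)), (none : Option (Char × Char)))).1.map (fun v => v.1)).foldl
            (fun st v => if st.2 ≠ some v then (st.1 ++ [(PySem.List.count (((PySem.List.sorted ((word.toList.zip word.toList.tail).foldl pvStepL []) pvArcKey false).foldl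
            (fun st arc => if st.2 ≠ some arc then (st.1 ++ [arc], some arc) else st)
            (([] : List (Char × Char)), (none : Option (Char × Char)))).1.map (fun v => v.1)) v : Int)], some v) else st)
            (([] : List Int), (none : Option Char))).1)
        (fun x => x) true := rfl
  rw [hA, hB]
  set ps := word.toList.zip word.toList.tail with hps
  set E := ps.foldl pvStepE PySem.Set.empty with hE
  set D := ps.foldl pvStepA PySem.Dict.empty with hD
  set L := ps.foldl pvStepL [] with hL
  set S := PySem.List.sorted L pvArcKey false with hSs
  -- the two dedup loops, rewritten as pvDedup
  rw [show (S.foldl (fun st arc => if st.2 ≠ some arc then (st.1 ++ [arc], some arc) else st)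
      (([] : List (Char × Char)), (none : Option (Char × Char)))).1 = pvDedup none S by
    simpa using pvDedup_foldl (fun a => a) S [] none]
  set U := pvDedup (none : Option (Char × Char)) S with hU
  set F := U.map (fun v => v.1) with hF
  rw [show (F.foldl (fun st v => if st.2 ≠ some v then (st.1 ++ [(PySem.List.count F v : Int)], some v) else st)
      (([] : List Int), (none : Option Char))).1
      = (pvDedup none F).map (fun v => (PySem.List.count F v : Int)) by
    simpa using pvDedup_foldl (fun v => (PySem.List.count F v : Int)) F [] none]
  set V := pvDedup (none : Option Char) F with hV
  -- A-side invariant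
  have hInv : pvInv E D := pvInv_fold pvInv_init
  obtain ⟨hW, hN, hKN, hK, hS, hM⟩ := hInv
  -- arc-list membership
  have hLm : ∀ x y : Char, (x, y) ∈ L ↔ x ≠ y ∧ pvNormEdge x y ∈ E := by
    rw [hL, hE]
    exact pvL_mem ps [] PySem.Set.empty (by simp [PySem.Set.empty])
  have hSm : ∀ x y : Char, (x, y) ∈ S ↔ x ≠ y ∧ pvNormEdge x y ∈ E := by
    intro x y; rw [hSs, PySem.List.mem_sorted]; exact hLm x y
  -- U : sorted distinct arcs
  have hSpair : S.Pairwise (fun a b => pvArcKey a ≤ pvArcKey b) := by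
    rw [hSs]; exact PySem.List.sorted_pairwise L pvArcKey
  have hUpw : U.Pairwise (fun a b => pvArcKey a < pvArcKey b) :=
    (pvDedup_pairwise pvArcKey pvArcKeyInj S hSpair none (by simp)).1
  have hUnd : U.Nodup := pvPairwiseLtNodup pvArcKey U hUpw
  have hUm : ∀ x y : Char, (x, y) ∈ U ↔ x ≠ y ∧ pvNormEdge x y ∈ E := by
    intro x y; rw [hU, pvDedup_mem_none]; exact hSm x y
  -- F, V : sorted first components and their dedup
  have hFpair : F.Pairwise (fun a b => a.toNat ≤ b.toNat) := by
    rw [hF]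
    refine List.Pairwise.map _ ?_ hUpw
    intro a b hlt
    have h1 := pvCharLt a.2
    have h2 := pvCharLt b.2
    unfold pvArcKey at hlt
    omega
  have hVpw : V.Pairwise (fun a b => a.toNat < b.toNat) :=
    (pvDedup_pairwise (fun c => c.toNat) pvCharToNatInj F hFpair none (by simp)).1
  have hVnd : V.Nodup := pvPairwiseLtNodup _ V hVpw
  have hVm : ∀ c : Char, c ∈ V ↔ ∃ d : Char, c ≠ d ∧ pvNormEdge c d ∈ E := by
    intro c
    rw [hV, pvDedup_mem_none, hF, List.mem_map]
    constructor
    · rintro ⟨⟨x, y⟩, hxy, rfl⟩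
      exact ⟨y, (hUm x y).mp hxy⟩
    · rintro ⟨d, hcd, hmem⟩
      exact ⟨(c, d), (hUm c d).mpr ⟨hcd, hmem⟩, rfl⟩
  -- per-vertex degree equality
  have hDeg : ∀ c : Char, ((PySem.List.count F c : Nat) : Int) = PySem.Set.len (D.getD c PySem.Set.empty) := by
    intro c
    have hcnt : PySem.List.count F c = (U.filter (fun x => x.1 == c)).length := by
      rw [PySem.List.count_eq, hF, List.count_eq_countP, List.countP_map,
        List.countP_eq_length_filter]
      rfl
    have hperm : ((U.filter (fun x => x.1 == c)).map (fun x => x.2)).Perm (D.getD c PySem.Set.empty) := by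
      rw [List.perm_ext_iff_of_nodup]
      · intro d
        rw [List.mem_map]
        constructor
        · rintro ⟨x, hx, rfl⟩
          obtain ⟨hxU, hx1⟩ := List.mem_filter.mp hx
          have hx1' : x.1 = c := by simpa using hx1
          have := (hUm x.1 x.2).mp (by rwa [Prod.mk.eta])
          rw [hx1'] at this
          exact (hM c x.2).mpr this
        · intro hd
          obtain ⟨hcd, hmem⟩ := (hM c d).mp hd
          refine ⟨(c, d), List.mem_filter.mpr ⟨(hUm c d).mpr ⟨hcd, hmem⟩, by simp⟩, rfl⟩
      · refine List.Nodup.map_on ?_ (hUnd.filter _)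
        intro x hx y hy he
        obtain ⟨_, hx1⟩ := List.mem_filter.mp hx
        obtain ⟨_, hy1⟩ := List.mem_filter.mp hy
        have hx1' : x.1 = c := by simpa using hx1
        have hy1' : y.1 = c := by simpa using hy1
        exact Prod.ext (by rw [hx1', hy1']) he
      · exact hS c
    have hlen := hperm.length_eq
    rw [List.length_map] at hlen
    show ((PySem.List.count F c : Nat) : Int) = ((D.getD c PySem.Set.empty).length : Int)
    rw [hcnt, hlen]
  -- the vertex lists agree as sets
  have hkeysperm : D.keys.Perm V := by
    rw [List.perm_ext_iff_of_nodup hKN hVnd]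
    intro c
    rw [hK c, hVm c]
    constructor
    · rintro ⟨⟨e1, e2⟩, he, hc⟩
      have hlt := hW _ he
      rcases hc with rfl | rfl
      · refine ⟨e2, ne_of_lt hlt, ?_⟩
        simpa [pvNormEdge, hlt] using he
      · refine ⟨e1, ne_of_gt hlt, ?_⟩
        rw [pvNormEdge_comm]
        simpa [pvNormEdge, hlt] using he
    · rintro ⟨d, hcd, hmem⟩
      refine ⟨pvNormEdge c d, hmem, ?_⟩
      rcases pvNormEdge_ends c d with ⟨h1, _⟩ | ⟨_, h2⟩
      · exact Or.inl h1.symm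
      · exact Or.inr h2.symm
  -- assemble: the two unsorted degree lists are permutations of one another
  have hAlist : D.values.map (fun s => PySem.Set.len s)
      = D.keys.map (fun c => PySem.Set.len (D.getD c PySem.Set.empty)) :=
    pvValues_map D hKN _ PySem.Set.empty
  have hBlist : V.map (fun v => (PySem.List.count F v : Int))
      = V.map (fun c => PySem.Set.len (D.getD c PySem.Set.empty)) :=
    List.map_congr_left (fun c _ => hDeg c)
  have hperm : (D.values.map (fun s => PySem.Set.len s)).Perm
      (V.map (fun v => (PySem.List.count F v : Int))) := by
    rw [hAlist, hBlist]
    exact hkeysperm.map _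
  have hsp : (PySem.List.sorted (D.values.map (fun s => PySem.Set.len s)) (fun x => x) true).Perm
      (PySem.List.sorted (V.map (fun v => (PySem.List.count F v : Int))) (fun x => x) true) :=
    ((PySem.List.sorted_perm _ _ _).trans hperm).trans (PySem.List.sorted_perm _ _ _).symm
  refine PySem.List.eq_of_perm_of_pairwise_le_of_injective (fun x : Int => -x) neg_injective hsp ?_ ?_
  · exact (PySem.List.sorted_pairwise_rev _ _).imp (fun h => by simpa using neg_le_neg h)
  · exact (PySem.List.sorted_pairwise_rev _ _).imp (fun h => by simpa using neg_le_neg h)
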